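-- pv_equiv track=rewrite | github.com/Minto108/python | pg9.py | check_double
-- ===== SOURCE A (Python) =====
-- def check_double(number):
--     num = str(number)
--     double = str(number * 2)
--     position_elements = {}
--     position_double = {}
--     if len(num) != len(double):
--         return False
--
--     for i in range(len(num)):
--         if num[i] in position_elements:
--             position_elements[num[i]] += 1
--         else:
--             position_elements[num[i]] = 1
--
--         if double[i] in position_double:
--             position_double[double[i]] += 1
--         else:
--             position_double[double[i]] = 1
--
--
--     for element in (double):
--         if element not in position_elements or str(number) == str(double):
--             return False
--         if position_double[element] != position_elements[element]:
--             return False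
--     return True
-- ===== SOURCE B (Python) =====
-- def check_double(number):
--     num = str(number)
--     double = str(number * 2)
--     return sorted(num) == sorted(double) and num != double
-- ===== Notes on version B (the rewrite author's own statement) =====
-- stated objective: simpler
-- what changed: Replaces the length check, two hand-built frequency dictionaries and the early-return verification loop with a single sort-and-compare: sorted(num) == sorted(double) (which subsumes the length and count checks) plus num != double (A returns False when the strings are equal, i.e. number == 0).
import Mathlib
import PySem

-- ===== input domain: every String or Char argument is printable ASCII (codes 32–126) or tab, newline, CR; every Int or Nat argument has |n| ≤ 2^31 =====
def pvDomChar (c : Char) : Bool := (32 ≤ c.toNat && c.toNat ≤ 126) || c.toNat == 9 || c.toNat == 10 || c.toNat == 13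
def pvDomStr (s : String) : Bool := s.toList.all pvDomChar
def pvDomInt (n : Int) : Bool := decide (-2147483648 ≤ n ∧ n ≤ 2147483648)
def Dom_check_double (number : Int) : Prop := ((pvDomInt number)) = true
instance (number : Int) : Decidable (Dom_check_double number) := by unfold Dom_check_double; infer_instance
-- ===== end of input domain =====

-- B replaces A's two hand-built frequency dictionaries and verification loop by sorting the two
-- digit strings and comparing them (plus A's num != double guard); objective: simpler.

-- ===== PORT A =====
-- the body of A's counting loop ('if x in d: d[x] += 1 else: d[x] = 1'), factored as a helper
def stepCount (d : PySem.Dict Char Int) (x : Char) : PySem.Dict Char Int :=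
  if d.contains x then d.modify x 0 (· + 1) else d.insert x 1

-- A's second loop with its early returns, as a structural recursion over 'double';
-- position_double[element] is always present there (element ∈ double), so getD is exact
def checkLoopA (pe pd : PySem.Dict Char Int) (num double : List Char) : List Char → Bool
  | [] => true
  | e :: rest =>
    if !(pe.contains e) || num == double then false
    else if pd.getD e 0 != pe.getD e 0 then false
    else checkLoopA pe pd num double rest

def check_double (number : Int) : Bool :=
  let num := (PySem.Int.toStr number).toList
  let double := (PySem.Int.toStr (number * 2)).toList
  if num.length ≠ double.length then false
  else
    -- indices from range(len(num)) are always in range, so pyGetD's default is never used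
    let st := (PySem.List.pyRange 0 (num.length : Int) 1).foldl
      (fun (st : PySem.Dict Char Int × PySem.Dict Char Int) i =>
        (stepCount st.1 (PySem.List.pyGetD num i ' '),
         stepCount st.2 (PySem.List.pyGetD double i ' ')))
      (PySem.Dict.empty, PySem.Dict.empty)
    checkLoopA st.1 st.2 num double double

-- ===== PORT B =====
def check_double_alt (number : Int) : Bool :=
  let num := PySem.Int.toStr number
  let double := PySem.Int.toStr (number * 2)
  (PySem.List.sorted num.toList (fun c => c) false
      == PySem.List.sorted double.toList (fun c => c) false)
    && !(num == double)

-- ===== PRECONDITION & SPEC =====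
def Spec_check_double (number : Int) (out : Bool) : Prop := out = check_double_alt number
instance (number : Int) (out : Bool) : Decidable (Spec_check_double number out) := by unfold Spec_check_double; infer_instance

-- ===== CLAIM (what is proved, stated in full; the proofs are below) =====
def Claim_equal_check_double : Prop := ∀ (number : Int), Dom_check_double number → Spec_check_double number (check_double number)

-- ===== LEMMAS AND PROOFS =====

-- str(n) is never the empty string
theorem toDigitsCore_length_ge (b : Nat) : ∀ (f n : Nat) (l : List Char),
    l.length ≤ (Nat.toDigitsCore b f n l).length := by
  intro f
  induction f with
  | zero => intro n l; simp [Nat.toDigitsCore]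
  | succ f ih =>
    intro n l
    simp only [Nat.toDigitsCore]
    split
    · simp
    · exact le_trans (by simp) (ih (n / b) (Nat.digitChar (n % b) :: l))

theorem toChars_ne_nil (n : Int) : PySem.Int.toChars n ≠ [] := by
  unfold PySem.Int.toChars
  split
  · simp
  · intro h
    unfold Nat.toDigits at h
    simp only [Nat.toDigitsCore] at h
    split at h
    · simp at h
    · have h1 := toDigitsCore_length_ge 10 n.toNat (n.toNat / 10) [Nat.digitChar (n.toNat % 10)]
      rw [h] at h1; simp at h1

-- counting with stepCount is counting
theorem getD_foldl_stepCount (l : List Char) : ∀ (d : PySem.Dict Char Int) (c : Char),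
    (l.foldl stepCount d).getD c 0 = d.getD c 0 + l.count c := by
  induction l with
  | nil => intro d c; simp
  | cons x xs ih =>
    intro d c
    have hx : (stepCount d x).getD c 0 = d.getD c 0 + if x = c then 1 else 0 := by
      unfold stepCount
      split
      · rw [PySem.Dict.getD_modify]
        rcases eq_or_ne c x with h | h
        · subst h; simp
        · simp [h, Ne.symm h]
      · rcases eq_or_ne c x with h | h
        · subst h
          rename_i hc
          rw [PySem.Dict.getD_insert_self, PySem.Dict.getD_of_not_contains d 0 (by simpa using hc)]
          simp
        · rw [PySem.Dict.getD_insert_of_ne _ _ _ h]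
          simp [Ne.symm h]
    rw [List.foldl_cons, ih, hx, List.count_cons]
    rcases eq_or_ne x c with h | h <;> simp [h] <;> push_cast <;> ring
  
theorem contains_foldl_stepCount (l : List Char) : ∀ (d : PySem.Dict Char Int) (c : Char),
    (l.foldl stepCount d).contains c = (d.contains c || l.contains c) := by
  induction l with
  | nil => intro d c; simp
  | cons x xs ih =>
    intro d c
    have hx : (stepCount d x).contains c = (c == x || d.contains c) := by
      unfold stepCount
      split
      · rw [PySem.Dict.contains_modify]
      · rw [PySem.Dict.contains_insert]
    rw [List.foldl_cons, ih, hx, List.contains_cons]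
    cases h1 : c == x <;> cases h2 : d.contains c <;> simp [h1, h2]

-- the paired counting fold splits into the two plain folds
theorem foldl_pair_split (l : List (Char × Char)) : ∀ (pe pd : PySem.Dict Char Int),
    (l.foldl (fun st p => (stepCount st.1 p.1, stepCount st.2 p.2)) (pe, pd))
      = (((l.map Prod.fst).foldl stepCount pe), ((l.map Prod.snd).foldl stepCount pd)) := by
  induction l with
  | nil => intro pe pd; simp
  | cons p rest ih => intro pe pd; simp [ih]

-- the indexed fold over range(len(num)) is the fold over the zipped character lists
theorem foldl_range_pair (nn dd : List Char) (h : nn.length = dd.length)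
    (pe pd : PySem.Dict Char Int) :
    ((PySem.List.pyRange 0 (nn.length : Int) 1).foldl
      (fun (st : PySem.Dict Char Int × PySem.Dict Char Int) i =>
        (stepCount st.1 (PySem.List.pyGetD nn i ' '),
         stepCount st.2 (PySem.List.pyGetD dd i ' ')))
      (pe, pd))
      = (nn.foldl stepCount pe, dd.foldl stepCount pd) := by
  have hz : (nn.zip dd).length = nn.length := by simp [List.length_zip, h]
  have hcongr : ((PySem.List.pyRange 0 (nn.length : Int) 1).foldl
      (fun (st : PySem.Dict Char Int × PySem.Dict Char Int) i =>
        (stepCount st.1 (PySem.List.pyGetD nn i ' '),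
         stepCount st.2 (PySem.List.pyGetD dd i ' ')))
      (pe, pd))
      = ((PySem.List.pyRange 0 (((nn.zip dd).length : Nat) : Int) 1).foldl
      (fun (st : PySem.Dict Char Int × PySem.Dict Char Int) i =>
        (fun st (p : Char × Char) => (stepCount st.1 p.1, stepCount st.2 p.2)) st
          (PySem.List.pyGetD (nn.zip dd) i (' ', ' ')))
      (pe, pd)) := by
    rw [hz]
    apply PySem.List.foldl_congr_mem
    intro acc x hx
    rw [PySem.List.mem_pyRange_one] at hx
    have hx1 : x < ((nn.zip dd).length : Int) := by omega
    have g1 : PySem.List.pyGetD nn x ' ' = nn[x.toNat]'(by omega) :=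
      PySem.List.pyGetD_eq_getElem nn ' ' hx.1 (by omega)
    have g2 : PySem.List.pyGetD dd x ' ' = dd[x.toNat]'(by omega) :=
      PySem.List.pyGetD_eq_getElem dd ' ' hx.1 (by omega)
    have g3 : PySem.List.pyGetD (nn.zip dd) x (' ', ' ')
        = (nn.zip dd)[x.toNat]'(by omega) :=
      PySem.List.pyGetD_eq_getElem _ _ hx.1 (by omega)
    simp [g1, g2, g3, List.getElem_zip]
  rw [hcongr, PySem.List.foldl_pyRange_zero_pyGetD' (nn.zip dd) (' ', ' ')
      (fun st (p : Char × Char) => (stepCount st.1 p.1, stepCount st.2 p.2)) (pe, pd),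
    foldl_pair_split]
  rw [List.map_fst_zip (le_of_eq h), List.map_snd_zip (le_of_eq h.symm)]

-- A's early-return verification loop is an 'all'
theorem checkLoopA_eq_all (pe pd : PySem.Dict Char Int) (num double : List Char) :
    ∀ (l : List Char), checkLoopA pe pd num double l
      = l.all (fun e => (pe.contains e && !(num == double)) && pd.getD e 0 == pe.getD e 0) := by
  intro l
  induction l with
  | nil => rfl
  | cons e rest ih =>
    rw [checkLoopA, List.all_cons, ih]
    rcases hc : pe.contains e <;> rcases hnd : (num == double) <;>
      rcases hv : (pd.getD e 0 == pe.getD e 0) <;> simp [hv, bne]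

-- core: A's per-element count check equals sorted-lists equality, under equal lengths
theorem core_counts_iff_sorted (N D : List Char) (hlen : N.length = D.length) :
    ((∀ e ∈ D, N.contains e = true ∧ (D.count e : Int) = (N.count e : Int))
      ↔ (PySem.List.sorted N (fun c => c) false = PySem.List.sorted D (fun c => c) false)) := by
  constructor
  · intro hall
    have hsub : D.Subperm N := by
      rw [List.subperm_iff_count]
      intro a
      by_cases ha : a ∈ D
      · have := (hall a ha).2
        omega
      · simp [List.count_eq_zero_of_not_mem ha]
    have hperm : D.Perm N := hsub.perm_of_length_le (le_of_eq hlen)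
    exact (PySem.List.sorted_id_eq_sorted_id_iff_perm N D).mpr hperm.symm
  · intro hs
    have hperm : N.Perm D := (PySem.List.sorted_id_eq_sorted_id_iff_perm N D).mp hs
    intro e he
    refine ⟨by simpa using hperm.mem_iff.mpr he, ?_⟩
    rw [hperm.count_eq]

-- String equality of two str(n) results is list equality of the digit lists
theorem toStr_beq_eq (a b : Int) :
    (PySem.Int.toStr a == PySem.Int.toStr b)
      = (PySem.Int.toChars a == PySem.Int.toChars b) := by
  rcases h : (PySem.Int.toChars a == PySem.Int.toChars b)
  · rw [beq_eq_false_iff_ne] at h ⊢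
    intro he
    exact h (by rw [← PySem.Int.toList_toStr, ← PySem.Int.toList_toStr, he])
  · rw [beq_iff_eq] at h ⊢
    exact String.toList_inj.mp (by rw [PySem.Int.toList_toStr, PySem.Int.toList_toStr, h])

-- ===== VERDICT (by name: the statement is the Claim_ definition above) =====
theorem check_double_spec : Claim_equal_check_double := by
  intro number _
  unfold Spec_check_double check_double check_double_alt
  simp only [PySem.Int.toList_toStr, toStr_beq_eq]
  set N := PySem.Int.toChars number with hN
  set D := PySem.Int.toChars (number * 2) with hD
  by_cases hlen : N.length = D.length
  · rw [if_neg (not_not_intro hlen), foldl_range_pair N D hlen, checkLoopA_eq_all]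
    by_cases hnd : N = D
    · -- A: first loop iteration returns False (D nonempty); B: the num != double guard
      have hDne : D ≠ [] := toChars_ne_nil _
      rcases D with _ | ⟨d0, rest⟩
      · exact absurd rfl hDne
      · simp [hnd]
    · have hb : (N == D) = false := beq_eq_false_iff_ne.mpr hnd
      rcases hs : (PySem.List.sorted N (fun c => c) false
          == PySem.List.sorted D (fun c => c) false)
      · -- sorted lists differ: some element of D has a count mismatch (or is missing)
        rw [beq_eq_false_iff_ne] at hs
        have := (not_iff_not.mpr (core_counts_iff_sorted N D hlen)).mpr hs
        rw [not_forall] at this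
        obtain ⟨e, he⟩ := this
        simp only [hb, Bool.not_false, Bool.and_true] at *
        rw [List.all_eq_false]
        rcases Classical.em (e ∈ D) with hmem | hmem
        · refine ⟨e, hmem, ?_⟩
          have : ¬(N.contains e = true ∧ (D.count e : Int) = (N.count e : Int)) := by
            intro hc; exact he (fun _ => hc)
          rw [not_and_or] at this
          rcases this with h1 | h1
          · have h1' : e ∉ N := by simpa using h1
            simp [contains_foldl_stepCount, h1']
          · simp [contains_foldl_stepCount, getD_foldl_stepCount, h1]
        · exact absurd (fun h => absurd h hmem) he
      · -- sorted lists equal: every element of D passes A's checks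
        rw [beq_iff_eq] at hs
        have hall := (core_counts_iff_sorted N D hlen).mpr hs
        simp only [hb, Bool.not_false, Bool.and_true]
        rw [List.all_eq_true]
        intro e he
        obtain ⟨h1, h2⟩ := hall e he
        have h1' : e ∈ N := by simpa using h1
        simp [contains_foldl_stepCount, getD_foldl_stepCount, h1', h2]
  · -- lengths differ: A returns False; sorted lists have different lengths, so B's == is false
    rw [if_pos hlen]
    have : (PySem.List.sorted N (fun c => c) false
        == PySem.List.sorted D (fun c => c) false) = false := by
      rw [beq_eq_false_iff_ne]
      intro h
      exact hlen (by
        have := congrArg List.length h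
        simpa [PySem.List.length_sorted] using this)
    simp [this]
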